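-- pv_equiv track=rewrite | github.com/chatbau/text_to_MIDI_web_app | text_to_midi_live.py | apply_voicing_to_chord
-- ===== SOURCE A (Python) =====
-- DEFAULT_LOW_NOTE = 40
--
-- DEFAULT_HIGH_NOTE = 90
--
-- def _normalize_voicing_mode(voicing_mode):
--     mode = str(voicing_mode or "closed").strip().lower()
--     return "open" if mode == "open" else "closed"
--
-- def apply_voicing_to_chord(chord, voicing_mode="closed", low=DEFAULT_LOW_NOTE, high=DEFAULT_HIGH_NOTE):
--     notes = sorted(set(int(n) for n in chord))
--     if len(notes) <= 1:
--         return notes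
--
--     mode = _normalize_voicing_mode(voicing_mode)
--     if mode == "closed":
--         root = notes[0]
--         closed = []
--         for n in notes:
--             c = n
--             while c - root > 11 and c - 12 >= low:
--                 c -= 12
--             closed.append(c)
--         return sorted(set(max(low, min(high, n)) for n in closed))
--
--     opened = [notes[0]]
--     for n in notes[1:]:
--         c = n
--         while c - opened[-1] < 5 and c + 12 <= high:
--             c += 12
--         opened.append(c)
--     return sorted(set(max(low, min(high, n)) for n in opened))
-- ===== SOURCE B (Python) =====
-- DEFAULT_LOW_NOTE = 40
-- DEFAULT_HIGH_NOTE = 90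
--
-- def apply_voicing_to_chord(chord, voicing_mode="closed", low=DEFAULT_LOW_NOTE, high=DEFAULT_HIGH_NOTE):
--     notes = sorted(set(int(n) for n in chord))
--     if len(notes) <= 1:
--         return notes
--     mode = str(voicing_mode or "closed").strip().lower()
--     if mode != "open":
--         root = notes[0]
--         voiced = [n - 12 * max(0, min((n - root) // 12, (n - low) // 12)) for n in notes]
--     else:
--         voiced = [notes[0]]
--         prev = notes[0]
--         for n in notes[1:]:
--             k = max(0, min((prev + 16 - n) // 12, (high - n) // 12))
--             prev = n + 12 * k
--             voiced.append(prev)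
--     return sorted(set(max(low, min(high, v)) for v in voiced))
-- ===== Notes on version B (the rewrite author's own statement) =====
-- stated objective: faster
-- what changed: Each per-note decrement/increment while-loop (one iteration per octave of shift) is replaced by a direct closed-form shift count: the clamped minimum of the interval-driven cap and the range-driven cap, computed with floor divisions by 12.
import Mathlib
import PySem

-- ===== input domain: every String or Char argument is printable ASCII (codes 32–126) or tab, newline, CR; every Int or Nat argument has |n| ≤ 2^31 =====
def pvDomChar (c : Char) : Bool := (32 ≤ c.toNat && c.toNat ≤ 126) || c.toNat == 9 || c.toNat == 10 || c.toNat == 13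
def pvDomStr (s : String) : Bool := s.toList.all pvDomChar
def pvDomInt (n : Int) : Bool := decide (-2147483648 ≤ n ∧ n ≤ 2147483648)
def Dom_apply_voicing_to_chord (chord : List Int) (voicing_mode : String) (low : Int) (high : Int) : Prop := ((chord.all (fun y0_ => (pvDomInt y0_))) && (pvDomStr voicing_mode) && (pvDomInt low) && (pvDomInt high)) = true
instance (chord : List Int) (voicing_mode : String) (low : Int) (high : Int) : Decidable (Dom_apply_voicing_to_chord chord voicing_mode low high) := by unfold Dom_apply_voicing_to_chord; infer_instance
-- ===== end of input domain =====

-- B replaces each decrement/increment while-loop by one closed-form octave-shift count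
-- (the clamped minimum of the interval-driven cap and the range-driven cap); objective: simpler.

-- 'sorted(set(max(low, min(high, n)) for n in xs))' — the identical final line of both A and B
def pyClampSortedSet (low high : Int) (xs : List Int) : List Int :=
  PySem.List.sorted (PySem.Set.ofList (xs.map (fun n => max low (min high n)))) (fun x => x) false

-- ===== PORT A =====
-- the inner 'while c - root > 11 and c - 12 >= low: c -= 12' loop of A
def closedShiftA (root low c : Int) : Int :=
  if c - root > 11 ∧ c - 12 ≥ low then closedShiftA root low (c - 12) else c
termination_by (c - root).toNat
decreasing_by omega

-- the inner 'while c - opened[-1] < 5 and c + 12 <= high: c += 12' loop of A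
def openShiftA (high prev c : Int) : Int :=
  if c - prev < 5 ∧ c + 12 ≤ high then openShiftA high prev (c + 12) else c
termination_by (high - c).toNat
decreasing_by omega

-- 'closed = []; for n in notes: ... closed.append(c)'
def closedLoopA (root low : Int) (notes : List Int) : List Int :=
  notes.foldl (fun acc n => acc ++ [closedShiftA root low n]) []

-- 'opened = [notes[0]]; for n in notes[1:]: ... opened.append(c)'  (opened[-1] = acc.getLastD 0)
def openLoopA (high first : Int) (rest : List Int) : List Int :=
  rest.foldl (fun acc n => acc ++ [openShiftA high (acc.getLastD 0) n]) [first]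

def apply_voicing_to_chord (chord : List Int) (voicing_mode : String) (low : Int) (high : Int) : List Int :=
  let notes := PySem.List.sorted (PySem.Set.ofList chord) (fun x => x) false
  if notes.length ≤ 1 then notes
  else
    let mode0 := PySem.Str.lower (PySem.Str.strip (if voicing_mode == "" then "closed" else voicing_mode))
    let mode := if mode0 == "open" then "open" else "closed"
    if mode == "closed" then
      let root := notes.headD 0
      let closed := closedLoopA root low notes
      pyClampSortedSet low high closed
    else
      let opened := openLoopA high (notes.headD 0) notes.tail
      pyClampSortedSet low high opened

-- ===== PORT B =====
-- closed mode: per-note closed-form shift count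
def closedLoopB (root low : Int) (notes : List Int) : List Int :=
  notes.map (fun n =>
    n - 12 * max 0 (min (PySem.Int.floordiv (n - root) 12) (PySem.Int.floordiv (n - low) 12)))

-- open mode: fold carrying (voiced list, prev)
def openLoopB (high first : Int) (rest : List Int) : List Int :=
  (rest.foldl (fun (st : List Int × Int) n =>
      let k := max 0 (min (PySem.Int.floordiv (st.2 + 16 - n) 12) (PySem.Int.floordiv (high - n) 12))
      (st.1 ++ [n + 12 * k], n + 12 * k)) ([first], first)).1

def apply_voicing_to_chord_alt (chord : List Int) (voicing_mode : String) (low : Int) (high : Int) : List Int :=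
  let notes := PySem.List.sorted (PySem.Set.ofList chord) (fun x => x) false
  if notes.length ≤ 1 then notes
  else
    let mode := PySem.Str.lower (PySem.Str.strip (if voicing_mode == "" then "closed" else voicing_mode))
    if ¬ (mode == "open") then
      let voiced := closedLoopB (notes.headD 0) low notes
      pyClampSortedSet low high voiced
    else
      let voiced := openLoopB high (notes.headD 0) notes.tail
      pyClampSortedSet low high voiced

-- ===== PRECONDITION & SPEC =====
def Spec_apply_voicing_to_chord (chord : List Int) (voicing_mode : String) (low : Int) (high : Int) (out : List Int) : Prop := out = apply_voicing_to_chord_alt chord voicing_mode low high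
instance (chord : List Int) (voicing_mode : String) (low : Int) (high : Int) (out : List Int) : Decidable (Spec_apply_voicing_to_chord chord voicing_mode low high out) := by unfold Spec_apply_voicing_to_chord; infer_instance

-- ===== CLAIM (what is proved, stated in full; the proofs are below) =====
def Claim_equal_apply_voicing_to_chord : Prop := ∀ (chord : List Int) (voicing_mode : String) (low : Int) (high : Int), Dom_apply_voicing_to_chord chord voicing_mode low high → Spec_apply_voicing_to_chord chord voicing_mode low high (apply_voicing_to_chord chord voicing_mode low high)

-- ===== LEMMAS AND PROOFS =====

theorem closedShiftA_eq (root low c : Int) :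
    closedShiftA root low c
      = c - 12 * max 0 (min (PySem.Int.floordiv (c - root) 12) (PySem.Int.floordiv (c - low) 12)) := by
  fun_induction closedShiftA root low c with
  | case1 c h ih =>
      rw [ih]
      rw [PySem.Int.floordiv_eq_ediv_of_pos (a := c - 12 - root) (show (0:Int) < 12 by norm_num),
          PySem.Int.floordiv_eq_ediv_of_pos (a := c - 12 - low) (show (0:Int) < 12 by norm_num),
          PySem.Int.floordiv_eq_ediv_of_pos (a := c - root) (show (0:Int) < 12 by norm_num),
          PySem.Int.floordiv_eq_ediv_of_pos (a := c - low) (show (0:Int) < 12 by norm_num)]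
      omega
  | case2 c h =>
      rw [PySem.Int.floordiv_eq_ediv_of_pos (a := c - root) (show (0:Int) < 12 by norm_num),
          PySem.Int.floordiv_eq_ediv_of_pos (a := c - low) (show (0:Int) < 12 by norm_num)]
      omega

theorem openShiftA_eq (high prev c : Int) :
    openShiftA high prev c
      = c + 12 * max 0 (min (PySem.Int.floordiv (prev + 16 - c) 12) (PySem.Int.floordiv (high - c) 12)) := by
  fun_induction openShiftA high prev c with
  | case1 c h ih =>
      rw [ih]
      rw [PySem.Int.floordiv_eq_ediv_of_pos (a := prev + 16 - (c + 12)) (show (0:Int) < 12 by norm_num),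
          PySem.Int.floordiv_eq_ediv_of_pos (a := high - (c + 12)) (show (0:Int) < 12 by norm_num),
          PySem.Int.floordiv_eq_ediv_of_pos (a := prev + 16 - c) (show (0:Int) < 12 by norm_num),
          PySem.Int.floordiv_eq_ediv_of_pos (a := high - c) (show (0:Int) < 12 by norm_num)]
      omega
  | case2 c h =>
      rw [PySem.Int.floordiv_eq_ediv_of_pos (a := prev + 16 - c) (show (0:Int) < 12 by norm_num),
          PySem.Int.floordiv_eq_ediv_of_pos (a := high - c) (show (0:Int) < 12 by norm_num)]
      omega

theorem foldl_append_singleton_eq_map (f : Int → Int) (l init : List Int) :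
    l.foldl (fun acc n => acc ++ [f n]) init = init ++ l.map f := by
  induction l generalizing init with
  | nil => simp
  | cons x xs ih => simp [List.foldl_cons, ih]

theorem closedLoop_eq (root low : Int) (notes : List Int) :
    closedLoopA root low notes = closedLoopB root low notes := by
  unfold closedLoopA closedLoopB
  rw [foldl_append_singleton_eq_map]
  simp only [List.nil_append]
  exact List.map_congr_left (fun n _ => closedShiftA_eq root low n)

theorem open_fold_eq (high : Int) (l : List Int) (acc : List Int) (p : Int)
    (hne : acc ≠ []) (hl : acc.getLastD 0 = p) :
    l.foldl (fun acc n => acc ++ [openShiftA high (acc.getLastD 0) n]) acc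
      = (l.foldl (fun (st : List Int × Int) n =>
          let k := max 0 (min (PySem.Int.floordiv (st.2 + 16 - n) 12) (PySem.Int.floordiv (high - n) 12))
          (st.1 ++ [n + 12 * k], n + 12 * k)) (acc, p)).1 := by
  induction l generalizing acc p with
  | nil => simp
  | cons x xs ih =>
      simp only [List.foldl_cons]
      rw [hl, openShiftA_eq]
      exact ih _ _ (by simp) (by simp)

theorem openLoop_eq (high first : Int) (rest : List Int) :
    openLoopA high first rest = openLoopB high first rest := by
  unfold openLoopA openLoopB
  exact open_fold_eq high rest [first] first (by simp) (by simp)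

set_option maxHeartbeats 1000000 in
theorem apply_voicing_to_chord_eq_alt (chord : List Int) (voicing_mode : String) (low high : Int) :
    apply_voicing_to_chord chord voicing_mode low high
      = apply_voicing_to_chord_alt chord voicing_mode low high := by
  unfold apply_voicing_to_chord apply_voicing_to_chord_alt
  by_cases hlen : (PySem.Set.ofList chord).length ≤ 1
  · simp [hlen]
  · by_cases hmode : PySem.Str.lower (PySem.Str.strip (if voicing_mode = "" then "closed" else voicing_mode)) = "open"
    · simp [hlen, hmode, openLoop_eq]
    · simp [hlen, hmode, closedLoop_eq]

-- ===== VERDICT (by name: the statement is the Claim_ definition above) =====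
theorem apply_voicing_to_chord_spec : Claim_equal_apply_voicing_to_chord := by
  intro chord vm low high _
  unfold Spec_apply_voicing_to_chord
  exact apply_voicing_to_chord_eq_alt chord vm low high
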